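-- pv_equiv track=rewrite | github.com/FireChickenProductivity/Talon-Voice-EquatIO-Commands | EquatIO/TextFieldNavigation.py | distance_to_nth_word_right
-- ===== SOURCE A (Python) =====
-- def distance_to_nth_word_right(text: str,num_words:int = 1):
--     words = text.split(" ")
--     if len(words) <= num_words: raise ValueError
--     else:
--         # initalize distance to number of words to include spaces
--         distance = num_words
--         # add the length of the words included
--         for i in range(num_words):
--             distance += len(words[i])
--         return distance
-- ===== SOURCE B (Python) =====
-- def distance_to_nth_word_right(text: str, num_words: int = 1):
--     # the distance is one space per word crossed plus one per letter of those words: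
--     # scan the characters, counting down the words still to cross
--     distance = num_words
--     remaining = num_words
--     for ch in text:
--         if remaining <= 0:
--             return distance
--         if ch == " ":
--             remaining -= 1
--         else:
--             distance += 1
--     if remaining <= 0:
--         return distance
--     raise ValueError
-- ===== Notes on version B (the rewrite author's own statement) =====
-- stated objective: alternative
-- what changed: B never builds the word list: it scans the characters once, counting down the words still to cross and adding 1 to the distance per letter, instead of A splitting the text into a word list and summing the first num_words word lengths by index in a second loop.
import Mathlib
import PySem

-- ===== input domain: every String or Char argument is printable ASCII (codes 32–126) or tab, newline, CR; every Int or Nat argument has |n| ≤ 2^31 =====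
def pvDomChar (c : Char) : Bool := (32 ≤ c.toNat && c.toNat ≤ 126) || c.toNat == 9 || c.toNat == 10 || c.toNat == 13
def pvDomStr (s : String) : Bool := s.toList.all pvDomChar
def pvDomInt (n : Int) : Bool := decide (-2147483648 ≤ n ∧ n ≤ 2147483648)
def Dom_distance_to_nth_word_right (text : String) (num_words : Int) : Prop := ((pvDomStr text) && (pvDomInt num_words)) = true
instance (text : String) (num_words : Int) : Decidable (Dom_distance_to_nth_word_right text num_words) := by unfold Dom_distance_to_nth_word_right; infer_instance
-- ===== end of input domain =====

-- B replaces A's split-into-a-word-list-then-sum with a single left-to-right character scan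
-- that counts down the words still to cross and adds 1 per letter (alternative decomposition).


-- ===== PORT A =====
-- words = text.split on a single-space separator; if len(words) <= num_words: raise ValueError (excluded by Pre_);
-- else distance = num_words; for i in range(num_words): distance += len(words[i]); return distance
def distance_to_nth_word_right (text : String) (num_words : Int) : Int :=
  let words := (PySem.Str.split? text " ").getD []
  if PySem.List.len words ≤ num_words then 0  -- Python raises ValueError here; excluded by Pre_
  else
    (PySem.List.pyRange 0 num_words).foldl
      (fun distance i => distance + PySem.Str.len (PySem.List.pyGetD words i "")) num_words

-- ===== PORT B =====
-- the for-loop of Source B over the characters: distance and remaining are the two loop variables;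
-- the [] case is Source B's code after the loop
def pvScan (cs : List Char) (distance remaining : Int) : Int :=
  match cs with
  | [] => if remaining ≤ 0 then distance else 0  -- Python raises ValueError here; excluded by Pre_
  | c :: rest =>
    if remaining ≤ 0 then distance
    else if c = ' ' then pvScan rest distance (remaining - 1)
    else pvScan rest (distance + 1) remaining

def distance_to_nth_word_right_alt (text : String) (num_words : Int) : Int :=
  pvScan text.toList num_words num_words

-- ===== PRECONDITION & SPEC =====
-- A raises ValueError exactly when text has fewer than num_words spaces
-- (the number of word pieces is spaces + 1 ≤ num_words); Pre_ excludes exactly those inputs.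
def Pre_distance_to_nth_word_right (text : String) (num_words : Int) : Prop :=
  num_words ≤ (text.toList.count ' ' : Int)
instance (text : String) (num_words : Int) : Decidable (Pre_distance_to_nth_word_right text num_words) := by
  unfold Pre_distance_to_nth_word_right; infer_instance

def pvWitness_distance_to_nth_word_right : String × Int := ("a b", 1)

def Spec_distance_to_nth_word_right (text : String) (num_words : Int) (out : Int) : Prop := out = distance_to_nth_word_right_alt text num_words
instance (text : String) (num_words : Int) (out : Int) : Decidable (Spec_distance_to_nth_word_right text num_words out) := by unfold Spec_distance_to_nth_word_right; infer_instance

-- ===== CLAIM (what is proved, stated in full; the proofs are below) =====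
def Claim_equal_distance_to_nth_word_right : Prop := ∀ (text : String) (num_words : Int), Dom_distance_to_nth_word_right text num_words → Pre_distance_to_nth_word_right text num_words → Spec_distance_to_nth_word_right text num_words (distance_to_nth_word_right text num_words)

-- ===== LEMMAS AND PROOFS =====

-- reference form of A's single-space split on char lists: cur is the word being accumulated (reversed)
def pvSplit : List Char → List Char → List (List Char)
  | [], cur => [cur.reverse]
  | c :: rest, cur => if c = ' ' then cur.reverse :: pvSplit rest [] else pvSplit rest (c :: cur)

-- splitOn.go on the single-char separator " " is pvSplit
theorem go_eq_pvSplit : ∀ (fuel : Nat) (l cur : List Char) (acc : List (List Char)),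
    l.length < fuel →
    PySem.Chars.splitOn.go [' '] fuel l cur acc = acc.reverse ++ pvSplit l cur := by
  intro fuel
  induction fuel with
  | zero => intro l cur acc h; omega
  | succ fuel ih =>
    intro l cur acc h
    match l with
    | [] => simp [PySem.Chars.splitOn.go, pvSplit]
    | c :: rest =>
      by_cases hc : c = ' '
      · subst hc
        have : [' '].isPrefixOf (' ' :: rest) = true := by simp [List.isPrefixOf]
        rw [PySem.Chars.splitOn.go]
        simp only [this, if_true, List.length_cons, List.drop_succ_cons, List.drop_zero,
          List.length_nil]
        rw [ih rest [] (cur.reverse :: acc) (by simp at h ⊢; omega)]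
        simp [pvSplit]
      · have : [' '].isPrefixOf (c :: rest) = false := by
          simp [List.isPrefixOf]; exact fun hh => (hc hh.symm).elim
        rw [PySem.Chars.splitOn.go]
        simp only [this, Bool.false_eq_true, if_false]
        rw [ih rest (c :: cur) acc (by simp at h ⊢; omega)]
        simp [pvSplit, hc]

theorem splitOn_eq_pvSplit (cs : List Char) :
    PySem.Chars.splitOn cs [' '] = pvSplit cs [] := by
  rw [PySem.Chars.splitOn, go_eq_pvSplit (cs.length + 1) cs [] [] (by omega)]
  simp

-- the accumulator only prefixes the first piece
theorem pvSplit_cur (l : List Char) : ∀ cur,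
    pvSplit l cur = (cur.reverse ++ (pvSplit l []).headI) :: (pvSplit l []).tail := by
  induction l with
  | nil => intro cur; simp [pvSplit]
  | cons c rest ih =>
    intro cur
    by_cases hc : c = ' '
    · simp [pvSplit, hc]
    · simp only [pvSplit, if_neg hc]
      rw [ih (c :: cur), ih [c]]
      simp

theorem pvSplit_length (l : List Char) : ∀ cur, (pvSplit l cur).length = l.count ' ' + 1 := by
  induction l with
  | nil => intro cur; simp [pvSplit]
  | cons c rest ih =>
    intro cur
    by_cases hc : c = ' '
    · subst hc; simp [pvSplit, ih]
    · simp [pvSplit, hc, ih]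

-- sum of the lengths of the first n pieces
def pvSumLen (n : Nat) (ws : List (List Char)) : Nat := ((ws.take n).map List.length).sum

-- the words of A's split: pvSplit of the text
theorem words_eq (text : String) :
    (PySem.Str.split? text " ").getD [] = (pvSplit text.toList []).map String.ofList := by
  simp [PySem.Str.split?, PySem.Chars.split?, splitOn_eq_pvSplit]

-- once remaining is exhausted the scan returns the accumulated distance at once
theorem pvScan_done (cs : List Char) (d r : Int) (h : r ≤ 0) : pvScan cs d r = d := by
  cases cs with
  | nil => simp [pvScan, h]
  | cons c rest => simp [pvScan, h]

-- B's scan adds the total length of the first n words to the running distance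
theorem pvScan_spec (cs : List Char) : ∀ (n : Nat) (d : Int), 1 ≤ n → n ≤ cs.count ' ' →
    pvScan cs d (n : Int) = d + (pvSumLen n (pvSplit cs []) : Int) := by
  induction cs with
  | nil => intro n d h1 h2; simp at h2; omega
  | cons c rest ih =>
    intro n d h1 h2
    by_cases hc : c = ' '
    · subst hc
      rw [show pvScan (' ' :: rest) d (n : Int) = pvScan rest d ((n : Int) - 1) by
        simp [pvScan]; omega]
      have hsl : ∀ m : Nat, pvSumLen (m + 1) (pvSplit (' ' :: rest) []) = pvSumLen m (pvSplit rest []) := by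
        intro m; simp [pvSplit, pvSumLen, List.take_succ_cons]
      by_cases hn : n = 1
      · subst hn
        rw [show ((1 : Nat) : Int) - 1 = 0 by norm_num, pvScan_done rest d 0 le_rfl, hsl 0]
        simp [pvSumLen]
      · obtain ⟨m, rfl⟩ : ∃ m, n = m + 1 := ⟨n - 1, by omega⟩
        have h2' : m ≤ rest.count ' ' := by simp at h2; omega
        rw [show ((m + 1 : Nat) : Int) - 1 = (m : Int) by push_cast; ring,
          ih m d (by omega) h2', hsl m]
    · have h2' : n ≤ rest.count ' ' := by
        rw [List.count_cons] at h2; simp [hc] at h2; omega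
      rw [show pvScan (c :: rest) d (n : Int) = pvScan rest (d + 1) (n : Int) by
        simp [pvScan, hc]; omega,
        ih n (d + 1) h1 h2']
      obtain ⟨m, rfl⟩ : ∃ m, n = m + 1 := ⟨n - 1, by omega⟩
      have hW : pvSplit rest [] = (pvSplit rest []).headI :: (pvSplit rest []).tail := by
        conv_lhs => rw [pvSplit_cur rest []]
        simp
      have hcons : pvSplit (c :: rest) [] =
          (c :: (pvSplit rest []).headI) :: (pvSplit rest []).tail := by
        simp only [pvSplit, if_neg hc]
        rw [pvSplit_cur rest [c]]
        simp
      have hsl : pvSumLen (m + 1) (pvSplit (c :: rest) [])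
          = pvSumLen (m + 1) (pvSplit rest []) + 1 := by
        rw [hcons]
        conv_rhs => rw [hW]
        simp [pvSumLen, List.take_succ_cons]
        ring
      rw [hsl]; push_cast; ring

-- A's foldl over range(n) sums the first n word lengths
theorem pvFold_spec (ws : List (List Char)) : ∀ (n : Nat) (init : Int), n ≤ ws.length →
    (PySem.List.pyRange 0 (n : Int)).foldl
      (fun d i => d + PySem.Str.len (PySem.List.pyGetD (ws.map String.ofList) i "")) init
    = init + (pvSumLen n ws : Int) := by
  intro n
  induction n with
  | zero =>
    intro init _
    have : PySem.List.pyRange 0 (0 : Int) = [] := by simp [PySem.List.pyRange]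
    simp [this, pvSumLen]
  | succ m ih =>
    intro init h
    have hm : m < ws.length := by omega
    rw [show ((m + 1 : Nat) : Int) = (m : Int) + 1 by push_cast; ring,
      PySem.List.pyRange_one_succ_right (by positivity), List.foldl_append,
      ih init (by omega)]
    have hget : PySem.List.pyGetD (ws.map String.ofList) (m : Int) "" = String.ofList ws[m] := by
      rw [PySem.List.pyGetD_natCast, List.getD_eq_getElem _ _ (by simpa using hm)]
      simp
    have hsl : pvSumLen (m + 1) ws = pvSumLen m ws + ws[m].length := by
      simp only [pvSumLen, List.map_take]
      rw [List.take_add_one, List.getElem?_eq_getElem (by simpa using hm)]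
      simp
    simp only [List.foldl_cons, List.foldl_nil, hget, hsl, PySem.Str.len_eq,
      String.toList_ofList]
    push_cast; ring

theorem pvLen_words (text : String) :
    PySem.List.len ((PySem.Str.split? text " ").getD []) = (text.toList.count ' ' : Int) + 1 := by
  rw [words_eq]
  simp [PySem.List.len, pvSplit_length]

-- ===== VERDICT (by name: the statement is the Claim_ definition above) =====
theorem distance_to_nth_word_right_spec : Claim_equal_distance_to_nth_word_right := by
  intro text nw _ hpre
  unfold Pre_distance_to_nth_word_right at hpre
  unfold Spec_distance_to_nth_word_right
  unfold distance_to_nth_word_right distance_to_nth_word_right_alt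
  rw [if_neg (by rw [pvLen_words]; omega)]
  by_cases h0 : nw ≤ 0
  · rw [pvScan_done _ _ _ h0]
    have : PySem.List.pyRange 0 nw = [] := by simp [PySem.List.pyRange]; omega
    simp [this]
  · obtain ⟨n, rfl⟩ : ∃ n : Nat, nw = (n : Int) := ⟨nw.toNat, by omega⟩
    have h1 : 1 ≤ n := by omega
    have h2 : n ≤ text.toList.count ' ' := by exact_mod_cast hpre
    rw [words_eq, pvFold_spec (pvSplit text.toList []) n _ (by rw [pvSplit_length]; omega),
      pvScan_spec text.toList n (n : Int) h1 h2]
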